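-- pv_equiv track=rewrite | github.com/dlwnsgud8406/mysolved | programmers/level3/3_numbergame.py | solution
-- ===== SOURCE A (Python) =====
-- import heapq
--
-- def solution(A, B):
--     answer = 0
--     A = [-i for i in A]
--     B = [-i for i in B]
--     heapq.heapify(A)
--     heapq.heapify(B)
--     while A and B:
--         a = heapq.heappop(A)
--         b = heapq.heappop(B)
--         if -a < -b:
--             answer = answer + 1
--         else:
--             heapq.heappush(B, b)
--     return answer
-- ===== SOURCE B (Python) =====
-- def solution(A, B):
--     A_desc = sorted(A, reverse=True)
--     B_desc = sorted(B, reverse=True)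
--     i = 0
--     count = 0
--     for a in A_desc:
--         if i < len(B_desc) and B_desc[i] > a:
--             i += 1
--             count += 1
--     return count
-- ===== Notes on version B (the rewrite author's own statement) =====
-- stated objective: simpler
-- what changed: Replaced the two negated heaps with their heapify/heappop/heappush pop-and-push-back cycle by sorting both lists descending once and counting wins in a single indexed sweep over A with one advancing pointer into B.
import Mathlib
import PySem

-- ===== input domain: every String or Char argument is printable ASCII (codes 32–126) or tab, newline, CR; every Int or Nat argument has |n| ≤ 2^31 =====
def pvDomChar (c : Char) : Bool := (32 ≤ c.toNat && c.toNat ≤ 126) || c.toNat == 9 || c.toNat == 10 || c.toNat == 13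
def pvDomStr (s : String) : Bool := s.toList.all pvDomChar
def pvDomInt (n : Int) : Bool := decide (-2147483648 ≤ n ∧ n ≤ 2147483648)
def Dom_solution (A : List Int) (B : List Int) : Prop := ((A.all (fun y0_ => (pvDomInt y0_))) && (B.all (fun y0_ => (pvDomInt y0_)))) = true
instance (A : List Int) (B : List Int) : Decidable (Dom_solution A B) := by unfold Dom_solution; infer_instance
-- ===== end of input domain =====

-- B replaces A's two negated heaps and the pop/push-back cycle with two descending
-- sorts and a single indexed sweep (objective: simpler).

-- ===== PORT A =====
-- heapq on List Int is modeled by a min-priority queue kept as an ascending sorted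
-- list: heapify = sorted ascending, heappop = head, heappush = ordered insert.
-- This is exact for the values observed by A: heappop returns the minimum of the
-- heap's multiset of Ints, and only those popped values (never the array layout)
-- reach A's result.
def pyHeapPush (h : List Int) (v : Int) : List Int :=
  match h with
  | [] => [v]
  | x :: xs => if v ≤ x then v :: x :: xs else x :: pyHeapPush xs v

-- the while-loop of A: pop max of A (head of negated heap), pop max of B,
-- count a win or push B's max back
def solutionLoop : List Int → List Int → Int → Int
  | [], _, answer => answer
  | _ :: _, [], answer => answer
  | a :: as, b :: bs, answer =>
      if -a < -b then solutionLoop as bs (answer + 1)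
      else solutionLoop as (pyHeapPush bs b) answer

def solution (A : List Int) (B : List Int) : Int :=
  solutionLoop (PySem.List.sorted (A.map (fun i => -i)) (fun x => x) false)
               (PySem.List.sorted (B.map (fun i => -i)) (fun x => x) false)
               0

-- ===== PORT B =====
def solution_alt (A : List Int) (B : List Int) : Int :=
  let Bd := PySem.List.sorted B (fun x => x) true
  ((PySem.List.sorted A (fun x => x) true).foldl
      (fun (st : Int × Int) a =>
        if st.1 < (Bd.length : Int) ∧ a < PySem.List.pyGetD Bd st.1 0
        then (st.1 + 1, st.2 + 1) else st)
      (0, 0)).2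

-- ===== PRECONDITION & SPEC =====
def Spec_solution (A : List Int) (B : List Int) (out : Int) : Prop := out = solution_alt A B
instance (A : List Int) (B : List Int) (out : Int) : Decidable (Spec_solution A B out) := by unfold Spec_solution; infer_instance

-- ===== CLAIM (what is proved, stated in full; the proofs are below) =====
def Claim_equal_solution : Prop := ∀ (A : List Int) (B : List Int), Dom_solution A B → Spec_solution A B (solution A B)

-- ===== LEMMAS AND PROOFS =====

-- the common abstraction: both programs sweep two descending lists
def g : List Int → List Int → Int
  | [], _ => 0
  | _ :: _, [] => 0
  | a :: as, b :: bs => if a < b then 1 + g as bs else g as (b :: bs)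

theorem g_nil_right (as : List Int) : g as [] = 0 := by
  cases as <;> rfl

theorem pyHeapPush_of_le (b : Int) (bs : List Int) (h : ∀ x ∈ bs, b ≤ x) :
    pyHeapPush bs b = b :: bs := by
  cases bs with
  | nil => rfl
  | cons x xs => simp [pyHeapPush, h x (by simp)]

theorem solutionLoop_eq_g (as : List Int) :
    ∀ (bs : List Int) (c : Int), bs.Pairwise (· ≤ ·) →
      solutionLoop as bs c = c + g (as.map (fun x => -x)) (bs.map (fun x => -x)) := by
  induction as with
  | nil => intro bs c _; cases bs <;> simp [solutionLoop, g]
  | cons a as ih =>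
    intro bs c hbs
    cases bs with
    | nil => simp [solutionLoop, g]
    | cons b bs =>
      rw [List.pairwise_cons] at hbs
      by_cases hab : -a < -b
      · rw [solutionLoop, if_pos hab, ih bs (c + 1) hbs.2]
        simp only [List.map_cons, g, if_pos (by omega : (-a : Int) < -b)]
        ring
      · rw [solutionLoop, if_neg hab, pyHeapPush_of_le b bs hbs.1,
           ih (b :: bs) c (List.pairwise_cons.mpr hbs)]
        simp only [List.map_cons, g, if_neg (by omega : ¬ (-a : Int) < -b)]

theorem fold_eq_g (Bd : List Int) (as : List Int) :
    ∀ (i : Nat) (c : Int),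
      ((as.foldl
        (fun (st : Int × Int) a =>
          if st.1 < (Bd.length : Int) ∧ a < PySem.List.pyGetD Bd st.1 0
          then (st.1 + 1, st.2 + 1) else st)
        ((i : Int), c)).2) = c + g as (Bd.drop i) := by
  induction as with
  | nil => intro i c; simp [g]
  | cons a as ih =>
    intro i c
    rcases hd : Bd.drop i with _ | ⟨b, bs⟩
    · have hi : ¬ ((i : Int) < (Bd.length : Int)) := by
        have := List.drop_eq_nil_iff.mp hd
        omega
      simp only [List.foldl_cons, if_neg (by tauto : ¬ ((i : Int) < (Bd.length : Int) ∧ a < PySem.List.pyGetD Bd (i : Int) 0))]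
      rw [ih i c, hd, g_nil_right, g_nil_right]
    · have hi : i < Bd.length := by
        by_contra h
        rw [List.drop_eq_nil_iff.mpr (by omega)] at hd
        exact absurd hd (by simp)
      have hcons : Bd.drop i = Bd[i] :: Bd.drop (i + 1) := List.drop_eq_getElem_cons hi
      have hb : Bd[i] = b := by rw [hcons] at hd; exact (List.cons.injEq .. ▸ hd).1
      have hget : PySem.List.pyGetD Bd (i : Int) 0 = b := by
        rw [PySem.List.pyGetD_natCast]
        simp [List.getD, List.getElem?_eq_getElem hi, hb]
      by_cases hab : a < b
      · simp only [List.foldl_cons, hget,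
          if_pos (⟨by omega, hab⟩ : (i : Int) < (Bd.length : Int) ∧ a < b)]
        have : ((i : Int) + 1) = ((i + 1 : Nat) : Int) := by omega
        rw [this, ih (i + 1) (c + 1)]
        have hdrop : Bd.drop (i + 1) = bs := by
          rw [hcons] at hd
          exact (List.cons.injEq .. ▸ hd).2
        simp only [g, if_pos hab]
        rw [hdrop]
        ring
      · simp only [List.foldl_cons, hget,
          if_neg (by tauto : ¬ ((i : Int) < (Bd.length : Int) ∧ a < b))]
        rw [ih i c, hd]
        simp only [g, if_neg hab]

-- sorting the negations ascending is the negation of sorting descending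
theorem sorted_neg_eq (A : List Int) :
    PySem.List.sorted (A.map (fun i => -i)) (fun x => x) false
      = (PySem.List.sorted A (fun x => x) true).map (fun i => -i) := by
  apply List.Perm.eq_of_pairwise' (r := (· ≤ · : Int → Int → Prop))
  · exact PySem.List.sorted_pairwise ..
  · rw [List.pairwise_map]
    exact (PySem.List.sorted_pairwise_rev ..).imp (by intro a b h; omega)
  · exact (PySem.List.sorted_perm ..).trans
      ((PySem.List.sorted_perm ..).map (fun i => -i)).symm

-- ===== VERDICT (by name: the statement is the Claim_ definition above) =====
theorem solution_spec : Claim_equal_solution := by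
  intro A B _
  unfold Spec_solution solution solution_alt
  rw [solutionLoop_eq_g _ _ _ (PySem.List.sorted_pairwise ..), sorted_neg_eq, sorted_neg_eq,
     List.map_map, List.map_map]
  have hmap : ∀ l : List Int, l.map ((fun i : Int => -i) ∘ (fun i : Int => -i)) = l := by
    intro l; simp
  rw [hmap, hmap]
  have := fold_eq_g (PySem.List.sorted B (fun x => x) true) (PySem.List.sorted A (fun x => x) true) 0 0
  simp only [Nat.cast_zero] at this
  rw [this, List.drop_zero]
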